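-- pv_equiv track=rewrite | github.com/inputforge/pixelbot | src/pixelbot/ui/alignment.py | align_center
-- ===== SOURCE A (Python) =====
-- def align_center(
--     axis_size: int, children_sizes: list[int], spacing: int
-- ) -> list[tuple[int, int]]:
--     x = (axis_size - sum(children_sizes) - spacing * (len(children_sizes) - 1)) // 2
--     result = []
--     for size in children_sizes:
--         result.append((x, x + size))
--         x += size + spacing
--     return result
-- ===== SOURCE B (Python) =====
-- def align_center(
--     axis_size: int, children_sizes: list[int], spacing: int
-- ) -> list[tuple[int, int]]:
--     n = len(children_sizes)
--     x0 = (axis_size - sum(children_sizes) - spacing * (n - 1)) // 2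
--     # phase 1: prefix-sum table (sum of sizes strictly before index i)
--     prefix = [0] * n
--     acc = 0
--     for i, size in enumerate(children_sizes):
--         prefix[i] = acc
--         acc += size
--     # phase 2: index-based pass over the table
--     out = []
--     for i in range(n):
--         start = x0 + prefix[i] + i * spacing
--         out.append((start, start + children_sizes[i]))
--     return out
-- ===== Notes on version B (the rewrite author's own statement) =====
-- stated objective: alternative
-- what changed: Replaced the running mutable cursor with a two-phase computation: a precomputed prefix-sum table of child sizes, then an index-based pass computing each start as x0 + prefix[i] + i*spacing.
import Mathlib
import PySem

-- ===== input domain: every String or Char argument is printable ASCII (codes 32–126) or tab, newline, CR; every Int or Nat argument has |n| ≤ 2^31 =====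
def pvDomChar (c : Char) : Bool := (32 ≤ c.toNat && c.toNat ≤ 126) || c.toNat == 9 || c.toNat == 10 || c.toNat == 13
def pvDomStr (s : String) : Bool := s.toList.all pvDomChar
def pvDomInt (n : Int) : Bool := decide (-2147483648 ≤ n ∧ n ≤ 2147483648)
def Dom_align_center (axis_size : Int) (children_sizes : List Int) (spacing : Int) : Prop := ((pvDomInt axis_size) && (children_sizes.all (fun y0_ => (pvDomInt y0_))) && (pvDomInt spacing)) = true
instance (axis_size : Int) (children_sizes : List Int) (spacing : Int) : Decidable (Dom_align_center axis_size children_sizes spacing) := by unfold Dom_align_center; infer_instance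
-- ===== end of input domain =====

-- B replaces A's running cursor with a prefix-sum table plus an index-based pass (alternative decomposition, same cost).

-- ===== PORT A =====
-- A's loop: running cursor x, appending (x, x+size) and advancing x by size+spacing.
def align_center (axis_size : Int) (children_sizes : List Int) (spacing : Int) : List (Int × Int) :=
  let x := PySem.Int.floordiv (axis_size - children_sizes.sum - spacing * ((children_sizes.length : Int) - 1)) 2
  (children_sizes.foldl
    (fun (st : Int × List (Int × Int)) size =>
      (st.1 + size + spacing, st.2 ++ [(st.1, st.1 + size)]))
    (x, [])).2

-- ===== PORT B =====
-- phase 1 of Source B: the prefix-sum table (sum of sizes strictly before each index)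
def pvPrefix (cs : List Int) (acc : Int) : List Int :=
  match cs with
  | [] => []
  | s :: rest => acc :: pvPrefix rest (acc + s)

def align_center_alt (axis_size : Int) (children_sizes : List Int) (spacing : Int) : List (Int × Int) :=
  let n := children_sizes.length
  let x0 := PySem.Int.floordiv (axis_size - children_sizes.sum - spacing * ((n : Int) - 1)) 2
  let pre := pvPrefix children_sizes 0
  -- phase 2 of Source B: for i in range(n) (indexing is always in range, so getD is exact)
  (List.range n).map (fun i =>
    let start := x0 + pre.getD i 0 + (i : Int) * spacing
    (start, start + children_sizes.getD i 0))

-- ===== PRECONDITION & SPEC =====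
def Spec_align_center (axis_size : Int) (children_sizes : List Int) (spacing : Int) (out : List (Int × Int)) : Prop := out = align_center_alt axis_size children_sizes spacing
instance (axis_size : Int) (children_sizes : List Int) (spacing : Int) (out : List (Int × Int)) : Decidable (Spec_align_center axis_size children_sizes spacing out) := by unfold Spec_align_center; infer_instance

-- ===== CLAIM (what is proved, stated in full; the proofs are below) =====
def Claim_equal_align_center : Prop := ∀ (axis_size : Int) (children_sizes : List Int) (spacing : Int), Dom_align_center axis_size children_sizes spacing → Spec_align_center axis_size children_sizes spacing (align_center axis_size children_sizes spacing)

-- ===== LEMMAS AND PROOFS =====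

-- common reference: A's loop written as structural recursion on the list
def pvLoop (cs : List Int) (sp x : Int) : List (Int × Int) :=
  match cs with
  | [] => []
  | s :: rest => (x, x + s) :: pvLoop rest sp (x + s + sp)

theorem pvFoldl_eq_loop (cs : List Int) (sp x : Int) (r : List (Int × Int)) :
    (cs.foldl
      (fun (st : Int × List (Int × Int)) size =>
        (st.1 + size + sp, st.2 ++ [(st.1, st.1 + size)]))
      (x, r)).2 = r ++ pvLoop cs sp x := by
  induction cs generalizing x r with
  | nil => simp [pvLoop]
  | cons s rest ih => simp [pvLoop, ih]

theorem pvPrefix_shift (cs : List Int) (a : Int) (i : Nat) (hi : i < cs.length) :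
    (pvPrefix cs a).getD i 0 = a + (pvPrefix cs 0).getD i 0 := by
  induction cs generalizing a i with
  | nil => simp at hi
  | cons s rest ih =>
    cases i with
    | zero => simp [pvPrefix]
    | succ i =>
      simp only [pvPrefix, List.getD_cons_succ]
      rw [ih (a + s) i (by simpa using hi), ih (0 + s) i (by simpa using hi)]
      ring

theorem pvMap_eq_loop (cs : List Int) (sp x : Int) :
    (List.range cs.length).map (fun i =>
      let start := x + (pvPrefix cs 0).getD i 0 + (i : Int) * sp
      (start, start + cs.getD i 0)) = pvLoop cs sp x := by
  induction cs generalizing x with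
  | nil => simp [pvLoop]
  | cons s rest ih =>
    simp only [List.length_cons, List.range_succ_eq_map, List.map_cons, List.map_map, pvLoop]
    congr 1
    · simp [pvPrefix]
    · rw [← ih (x + s + sp)]
      apply List.map_congr_left
      intro i hi
      have hlt : i < rest.length := List.mem_range.mp hi
      have h1 : (pvPrefix (s :: rest) 0).getD (i + 1) 0 = s + (pvPrefix rest 0).getD i 0 := by
        simp only [pvPrefix, List.getD_cons_succ]
        rw [pvPrefix_shift rest (0 + s) i hlt]
        ring
      simp only [Function.comp, Nat.succ_eq_add_one, List.getD_cons_succ, h1, Prod.mk.injEq]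
      push_cast
      constructor <;> ring

theorem align_center_spec : Claim_equal_align_center := by
  intro axis cs sp _
  unfold Spec_align_center align_center align_center_alt
  rw [pvFoldl_eq_loop, pvMap_eq_loop]
  simp
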